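-- pv_equiv track=rewrite | github.com/rohanpandula/FELScanner | integrations/upgrade_detector.py | _resolution_matches
-- ===== SOURCE A (Python) =====
-- def _resolution_matches(res1: str, res2: str) -> bool:
--     """Check if two resolutions are equivalent"""
--     resolution_aliases = {
--         '720p': ['hd', '720p'],
--         '1080p': ['full hd', 'fhd', '1080p'],
--         '2160p': ['4k', 'uhd', '2160p', '4k uhd'],
--         '8k': ['8k', '4320p']
--     }
--
--     res1_lower = res1.lower()
--     res2_lower = res2.lower()
--
--     # Direct match
--     if res1_lower == res2_lower:
--         return True
--
--     # Check aliases
--     for canonical, aliases in resolution_aliases.items():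
--         if res1_lower in aliases and res2_lower in aliases:
--             return True
--
--     return False
-- ===== SOURCE B (Python) =====
-- _RESOLUTION_ALIASES = {
--     '720p': ['hd', '720p'],
--     '1080p': ['full hd', 'fhd', '1080p'],
--     '2160p': ['4k', 'uhd', '2160p', '4k uhd'],
--     '8k': ['8k', '4320p']
-- }
--
-- # reverse index: alias string -> canonical group key (built once)
-- _ALIAS_INDEX = {alias: canonical
--                 for canonical, aliases in _RESOLUTION_ALIASES.items()
--                 for alias in aliases}
--
--
-- def _resolution_matches(res1: str, res2: str) -> bool:
--     """Check if two resolutions are equivalent"""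
--     a = res1.lower()
--     b = res2.lower()
--     if a == b:
--         return True
--     ka = _ALIAS_INDEX.get(a)
--     return ka is not None and ka == _ALIAS_INDEX.get(b)
-- ===== Notes on version B (the rewrite author's own statement) =====
-- stated objective: idiomatic
-- what changed: Replaces the per-call loop over alias groups (two membership scans per group) with a reverse index built once mapping each alias to its canonical key; the function is then two dict lookups and a comparison.
import Mathlib
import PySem

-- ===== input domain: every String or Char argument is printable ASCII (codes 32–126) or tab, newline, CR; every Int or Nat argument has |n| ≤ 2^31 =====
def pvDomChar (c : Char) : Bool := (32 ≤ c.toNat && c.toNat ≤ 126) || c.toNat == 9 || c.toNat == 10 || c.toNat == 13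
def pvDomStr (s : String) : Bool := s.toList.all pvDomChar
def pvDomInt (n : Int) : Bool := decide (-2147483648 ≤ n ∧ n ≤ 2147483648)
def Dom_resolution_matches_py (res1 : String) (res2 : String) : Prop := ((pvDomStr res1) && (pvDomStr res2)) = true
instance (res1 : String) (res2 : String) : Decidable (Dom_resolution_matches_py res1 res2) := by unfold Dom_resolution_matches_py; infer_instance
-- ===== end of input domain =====

-- B replaces A's per-call loop over alias groups with a reverse alias→canonical index
-- built once, so a match is two direct lookups and a comparison (idiomatic).

-- the alias table both Pythons write down literally
def resAliasTable : List (String × List String) :=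
  [("720p", ["hd", "720p"]),
   ("1080p", ["full hd", "fhd", "1080p"]),
   ("2160p", ["4k", "uhd", "2160p", "4k uhd"]),
   ("8k", ["8k", "4320p"])]

-- ===== PORT A =====
def resolution_matches_py (res1 : String) (res2 : String) : Bool :=
  let res1_lower := PySem.Str.lower res1
  let res2_lower := PySem.Str.lower res2
  if res1_lower == res2_lower then true
  else
    -- 'for canonical, aliases in …: if res1_lower in aliases and res2_lower in aliases: return True' / 'return False'
    resAliasTable.any (fun p => p.2.contains res1_lower && p.2.contains res2_lower)

-- ===== PORT B =====
-- the dict comprehension {alias: canonical for canonical, aliases in …items() for alias in aliases}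
def resAliasIndex : PySem.Dict String String :=
  PySem.Dict.ofList (resAliasTable.flatMap (fun p => p.2.map (fun a => (a, p.1))))

def resolution_matches_py_alt (res1 : String) (res2 : String) : Bool :=
  let a := PySem.Str.lower res1
  let b := PySem.Str.lower res2
  if a == b then true
  else
    match resAliasIndex.get? a, resAliasIndex.get? b with
    | some ka, some kb => ka == kb   -- ka is not None and ka == kb
    | _, _ => false

-- ===== PRECONDITION & SPEC =====
def Spec_resolution_matches_py (res1 : String) (res2 : String) (out : Bool) : Prop := out = resolution_matches_py_alt res1 res2
instance (res1 : String) (res2 : String) (out : Bool) : Decidable (Spec_resolution_matches_py res1 res2 out) := by unfold Spec_resolution_matches_py; infer_instance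

-- ===== CLAIM (what is proved, stated in full; the proofs are below) =====
def Claim_equal_resolution_matches_py : Prop := ∀ (res1 : String) (res2 : String), Dom_resolution_matches_py res1 res2 → Spec_resolution_matches_py res1 res2 (resolution_matches_py res1 res2)

-- ===== LEMMAS AND PROOFS =====

-- the reverse index, evaluated to its literal association list
theorem res_index_eval : resAliasIndex = PySem.Dict.mk
    [("hd","720p"),("720p","720p"),("full hd","1080p"),("fhd","1080p"),("1080p","1080p"),
     ("4k","2160p"),("uhd","2160p"),("2160p","2160p"),("4k uhd","2160p"),("8k","8k"),("4320p","8k")] := by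
  decide

-- core identity on the already-lowercased strings
theorem res_core_eq (a b : String) :
    (resAliasTable.any (fun p => p.2.contains a && p.2.contains b)) =
    (match resAliasIndex.get? a, resAliasIndex.get? b with
     | some ka, some kb => ka == kb
     | _, _ => false) := by
  have ha := Decidable.em (a ∈ (["hd","720p","full hd","fhd","1080p","4k","uhd","2160p","4k uhd","8k","4320p"] : List String))
  have hb := Decidable.em (b ∈ (["hd","720p","full hd","fhd","1080p","4k","uhd","2160p","4k uhd","8k","4320p"] : List String))
  rw [res_index_eval]
  simp only [List.mem_cons, List.not_mem_nil, or_false, not_or] at ha hb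
  rcases ha with ha | ha <;> rcases hb with hb | hb
  · -- both strings are aliases: substitute and compute
    rcases ha with rfl|rfl|rfl|rfl|rfl|rfl|rfl|rfl|rfl|rfl|rfl <;>
      rcases hb with rfl|rfl|rfl|rfl|rfl|rfl|rfl|rfl|rfl|rfl|rfl <;> decide
  · rcases ha with rfl|rfl|rfl|rfl|rfl|rfl|rfl|rfl|rfl|rfl|rfl <;>
      obtain ⟨h1,h2,h3,h4,h5,h6,h7,h8,h9,h10,h11⟩ := hb <;>
      simp [resAliasTable, PySem.Dict.get?, h1,h2,h3,h4,h5,h6,h7,h8,h9,h10,h11, Ne.symm]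
  · rcases hb with rfl|rfl|rfl|rfl|rfl|rfl|rfl|rfl|rfl|rfl|rfl <;>
      obtain ⟨h1,h2,h3,h4,h5,h6,h7,h8,h9,h10,h11⟩ := ha <;>
      simp [resAliasTable, PySem.Dict.get?, h1,h2,h3,h4,h5,h6,h7,h8,h9,h10,h11, Ne.symm]
  · obtain ⟨g1,g2,g3,g4,g5,g6,g7,g8,g9,g10,g11⟩ := ha
    obtain ⟨h1,h2,h3,h4,h5,h6,h7,h8,h9,h10,h11⟩ := hb
    simp [resAliasTable, PySem.Dict.get?, g1,g2,g3,g4,g5,g6,g7,g8,g9,g10,g11,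
      h1,h2,h3,h4,h5,h6,h7,h8,h9,h10,h11, Ne.symm]

-- ===== VERDICT (by name: the statement is the Claim_ definition above) =====
theorem resolution_matches_py_spec : Claim_equal_resolution_matches_py := by
  intro res1 res2 _
  unfold Spec_resolution_matches_py resolution_matches_py resolution_matches_py_alt
  by_cases h : PySem.Str.lower res1 == PySem.Str.lower res2
  · simp [h]
  · simp only [h, if_false, Bool.false_eq_true]
    exact res_core_eq _ _
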